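-- pv_equiv track=rewrite | github.com/MrBrantCode/unitest_baseline | mut_generate/mist_train_taco/taco_11350/solution.py | count_ways_to_solve_crime
-- ===== SOURCE A (Python) =====
-- def count_ways_to_solve_crime(n, m, k, links):
--     adj = [[] for _ in range(n)]
--     vis = [False] * n
--     acc = [0] * n
--     cc = 0
--
--     for v, w in links:
--         adj[v - 1].append(w - 1)
--         adj[w - 1].append(v - 1)
--
--     def ittDfs(node):
--         queue = [node]
--         while queue:
--             node = queue.pop()
--             if vis[node]:
--                 continue
--             vis[node] = True
--             acc[cc] += 1
--             for i in adj[node]: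
--                 if not vis[i]:
--                     queue.append(i)
--
--     for i in range(n):
--         if not vis[i]:
--             ittDfs(i)
--             cc += 1
--
--     if cc == 1:
--         return 1 % k
--
--     ans = 1
--     for i in range(cc - 2):
--         ans = ans * n
--         ans = ans % k
--     for i in range(cc):
--         ans = ans * acc[i]
--         ans = ans % k
--
--     return ans
-- ===== SOURCE B (Python) =====
-- def count_ways_to_solve_crime(n, m, k, links):
--     # label-merging component finder: comp[x] is the current component label of x;
--     # each edge relabels one component onto the other (no adjacency lists, no traversal)
--     comp = list(range(n))
--     for v, w in links:
--         a = comp[v - 1]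
--         b = comp[w - 1]
--         if a != b:
--             comp = [b if c == a else c for c in comp]
--     sizes = {}
--     for c in comp:
--         sizes[c] = sizes.get(c, 0) + 1
--     cc = len(sizes)
--     if cc == 1:
--         return 1 % k
--     ans = 1
--     for i in range(cc - 2):
--         ans = ans * n % k
--     for s in sizes.values():
--         ans = ans * s % k
--     return ans
-- ===== Notes on version B (the rewrite author's own statement) =====
-- stated objective: alternative
-- what changed: Replaced A's adjacency-list construction plus iterative stack-DFS component search with a per-edge label-merging component finder (comp[x] holds a component label; each edge relabels one endpoint's component onto the other's) and a counting dict for component sizes; the closing product formula is unchanged.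
import Mathlib
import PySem

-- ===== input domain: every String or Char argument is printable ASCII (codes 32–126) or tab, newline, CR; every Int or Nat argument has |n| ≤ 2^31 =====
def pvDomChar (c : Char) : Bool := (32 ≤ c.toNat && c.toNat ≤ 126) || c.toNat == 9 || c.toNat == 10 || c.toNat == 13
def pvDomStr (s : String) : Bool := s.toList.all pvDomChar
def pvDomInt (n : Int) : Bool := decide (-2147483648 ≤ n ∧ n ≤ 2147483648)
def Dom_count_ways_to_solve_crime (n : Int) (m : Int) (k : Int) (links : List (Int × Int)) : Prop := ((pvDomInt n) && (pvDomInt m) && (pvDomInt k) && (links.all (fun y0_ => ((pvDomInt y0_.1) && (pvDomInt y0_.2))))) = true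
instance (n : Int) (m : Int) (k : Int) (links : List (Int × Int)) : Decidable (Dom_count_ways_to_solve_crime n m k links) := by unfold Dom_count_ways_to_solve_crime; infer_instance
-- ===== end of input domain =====

-- B replaces A's adjacency-list + explicit-stack DFS component search with a per-edge
-- label-merging (relabelling) component finder; the closing product formula is the same.

-- ===== PORT A =====

-- Python's effective index for a list of length `len` (the value pyIdx? returns inside InRange)
def pvNrm (len : Nat) (i : Int) : Nat := if 0 ≤ i then i.toNat else len - (-i).toNat

theorem pvIdx_eq {len : Nat} {i : Int} (h : PySem.Raise.InRange len i) :
    PySem.List.pyIdx? len i = some (pvNrm len i) := by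
  unfold PySem.List.pyIdx? PySem.Raise.InRange pvNrm at *
  split <;> split <;> simp_all <;> omega

theorem pvNrm_lt {len : Nat} {i : Int} (h : PySem.Raise.InRange len i) : pvNrm len i < len := by
  unfold PySem.Raise.InRange pvNrm at *
  split <;> omega

theorem pvNrm_lt' {len : Nat} {i : Int} (h : PySem.Raise.InRange len i) : pvNrm len i < len :=
  pvNrm_lt h

-- A-side helper: adj[i].append(j) (out-of-range index would raise in Python; those inputs are outside Pre_)
def pvAddNbr (adj : List (List Int)) (i : Int) (j : Int) : List (List Int) :=
  match PySem.List.pyGet? adj i with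
  | some l => PySem.List.pySetD adj i (l ++ [j])
  | none => adj

-- termination helper for the DFS stack loop: marking an unvisited node shrinks the false-count
theorem pvCount_set_true (l : List Bool) (j : Nat) (hj : j < l.length) (hv : l[j] = false) :
    (l.set j true).count false + 1 = l.count false := by
  induction l generalizing j with
  | nil => simp at hj
  | cons b bs ih =>
    cases j with
    | zero => simp_all [List.count_cons]
    | succ j =>
      simp only [List.length_cons, Nat.add_lt_add_iff_right] at hj
      simp only [List.getElem_cons_succ] at hv
      simp [List.count_cons, ← ih j hj hv]; omega

theorem pvSet_count_lt (vis : List Bool) (node : Int)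
    (h : PySem.List.pyGet? vis node = some false) :
    (PySem.List.pySetD vis node true).count false < vis.count false := by
  have hin : PySem.Raise.InRange vis.length node := by
    by_contra hc
    rw [(PySem.List.pyGet?_eq_none_iff _ _).2 hc] at h
    simp at h
  have hj := pvNrm_lt' hin
  rw [PySem.List.pyGet?, pvIdx_eq hin] at h
  simp only [Option.bind_some] at h
  have hv : vis[pvNrm vis.length node] = false := by
    rw [List.getElem?_eq_getElem hj] at h
    exact Option.some.injEq _ _ ▸ (by simpa using h)
  have hset : PySem.List.pySetD vis node true = vis.set (pvNrm vis.length node) true := by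
    rw [PySem.List.pySetD, PySem.List.pySet?, pvIdx_eq hin]
    rfl
  rw [hset]
  have := pvCount_set_true vis _ hj hv
  omega

-- A's iterative DFS: queue is Python's stack with its top at the HEAD (append = cons, pop = head)
def pvDfs (adj : List (List Int)) (vis : List Bool) (acc : List Int) (cc : Nat)
    (queue : List Int) : List Bool × List Int :=
  match queue with
  | [] => (vis, acc)
  | node :: rest =>
    match h : PySem.List.pyGet? vis node with
    | none => (vis, acc)            -- IndexError in Python (outside Pre_)
    | some true => pvDfs adj vis acc cc rest
    | some false =>
      pvDfs adj (PySem.List.pySetD vis node true) (acc.modify cc (· + 1)) cc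
        (((PySem.List.pyGet? adj node).getD []).foldl
          (fun q i => if PySem.List.pyGetD (PySem.List.pySetD vis node true) i true then q else i :: q)
          rest)
termination_by (vis.count false, queue.length)
decreasing_by
  · exact Prod.Lex.right _ (by simp)
  · exact Prod.Lex.left _ _ (pvSet_count_lt vis node h)

def count_ways_to_solve_crime (n : Int) (m : Int) (k : Int) (links : List (Int × Int)) : Int :=
  let adj := links.foldl
    (fun adj vw => pvAddNbr (pvAddNbr adj (vw.1 - 1) (vw.2 - 1)) (vw.2 - 1) (vw.1 - 1))
    (List.replicate n.toNat ([] : List Int))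
  let st := (List.range n.toNat).foldl
    (fun s (i : Nat) =>
      if PySem.List.pyGetD s.1.1 (i : Int) false then s
      else
        let r := pvDfs adj s.1.1 s.1.2 s.2 [(i : Int)]
        ((r.1, r.2), s.2 + 1))
    ((List.replicate n.toNat false, List.replicate n.toNat (0 : Int)), 0)
  let cc := st.2
  if cc = 1 then PySem.Int.mod 1 k
  else
    let ans := (List.range (cc - 2)).foldl (fun a _ => PySem.Int.mod (a * n) k) 1
    (List.range cc).foldl (fun a (i : Nat) => PySem.Int.mod (a * PySem.List.pyGetD st.1.2 (i : Int) 0) k) ans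

-- ===== PORT B =====

def count_ways_to_solve_crime_alt (n : Int) (m : Int) (k : Int) (links : List (Int × Int)) : Int :=
  let comp := links.foldl
    (fun comp vw =>
      match PySem.List.pyGet? comp (vw.1 - 1), PySem.List.pyGet? comp (vw.2 - 1) with
      | some a, some b => if a ≠ b then comp.map (fun c => if c = a then b else c) else comp
      | _, _ => comp)          -- IndexError in Python (outside Pre_)
    ((List.range n.toNat).map (fun x : Nat => (x : Int)))
  let sizes := comp.foldl (fun d c => d.insert c (d.getD c 0 + 1)) PySem.Dict.empty
  let cc := sizes.size
  if cc = 1 then PySem.Int.mod 1 k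
  else
    let ans := (List.range (cc - 2)).foldl (fun a _ => PySem.Int.mod (a * n) k) 1
    sizes.values.foldl (fun a s => PySem.Int.mod (a * s) k) ans

-- ===== PRECONDITION & SPEC =====
-- Pre_ is exactly A's non-raising domain: every link endpoint must be a valid Python index
-- into the n-element arrays (negative wraparound included), and when n ≥ 1 the modulus k
-- must be nonzero (k = 0 makes A raise ZeroDivisionError).
def Pre_count_ways_to_solve_crime (n : Int) (m : Int) (k : Int) (links : List (Int × Int)) : Prop :=
  (∀ p ∈ links, PySem.Raise.InRange n.toNat (p.1 - 1) ∧ PySem.Raise.InRange n.toNat (p.2 - 1)) ∧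
  (n ≤ 0 ∨ k ≠ 0)

instance (n : Int) (m : Int) (k : Int) (links : List (Int × Int)) : Decidable (Pre_count_ways_to_solve_crime n m k links) := by
  unfold Pre_count_ways_to_solve_crime PySem.Raise.InRange; infer_instance

def pvWitness_count_ways_to_solve_crime : Int × Int × Int × (List (Int × Int)) := (3, 0, 5, [(1, 2)])

def Spec_count_ways_to_solve_crime (n : Int) (m : Int) (k : Int) (links : List (Int × Int)) (out : Int) : Prop := out = count_ways_to_solve_crime_alt n m k links
instance (n : Int) (m : Int) (k : Int) (links : List (Int × Int)) (out : Int) : Decidable (Spec_count_ways_to_solve_crime n m k links out) := by unfold Spec_count_ways_to_solve_crime; infer_instance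

-- ===== CLAIM (what is proved, stated in full; the proofs are below) =====
def Claim_equal_count_ways_to_solve_crime : Prop := ∀ (n : Int) (m : Int) (k : Int) (links : List (Int × Int)), Dom_count_ways_to_solve_crime n m k links → Pre_count_ways_to_solve_crime n m k links → Spec_count_ways_to_solve_crime n m k links (count_ways_to_solve_crime n m k links)

-- ===== LEMMAS AND PROOFS =====

-- the normalized edge list: each (v, w) becomes the pair of effective 0-based indices
def pvE (len : Nat) (links : List (Int × Int)) : List (Nat × Nat) :=
  links.map (fun p => (pvNrm len (p.1 - 1), pvNrm len (p.2 - 1)))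

def pvEstep (E : List (Nat × Nat)) (x y : Nat) : Prop := (x, y) ∈ E ∨ (y, x) ∈ E

def pvConn (E : List (Nat × Nat)) (x y : Nat) : Prop := Relation.ReflTransGen (pvEstep E) x y

noncomputable def pvConnB (E : List (Nat × Nat)) (x y : Nat) : Bool :=
  @decide (pvConn E x y) (Classical.propDecidable _)

noncomputable def pvMinB (E : List (Nat × Nat)) (x : Nat) : Bool :=
  !((List.range x).any (fun y => pvConnB E y x))

noncomputable def pvReps (E : List (Nat × Nat)) (i : Nat) : List Nat :=
  (List.range i).filter (pvMinB E)

noncomputable def pvSize (E : List (Nat × Nat)) (n r : Nat) : Nat :=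
  (List.range n).countP (fun x => pvConnB E r x)

noncomputable def pvBlocks (E : List (Nat × Nat)) (n i : Nat) : List Int :=
  (pvReps E i).map (fun r => (pvSize E n r : Int))

-- the common closing formula of both programs, as a function of (cc, component sizes)
def pvFormula (n k : Int) (cc : Nat) (sizes : List Int) : Int :=
  if cc = 1 then PySem.Int.mod 1 k
  else sizes.foldl (fun a s => PySem.Int.mod (a * s) k)
        ((List.range (cc - 2)).foldl (fun a _ => PySem.Int.mod (a * n) k) 1)

-- ---------- connectivity toolkit ----------

theorem pvEstep_symm (E : List (Nat × Nat)) : Symmetric (pvEstep E) :=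
  fun _ _ h => Or.symm h

theorem pvConn_symm {E : List (Nat × Nat)} {x y : Nat} (h : pvConn E x y) : pvConn E y x :=
  Relation.ReflTransGen.symmetric (pvEstep_symm E) h

theorem pvConn_nil {x y : Nat} : pvConn [] x y ↔ x = y := by
  rw [pvConn, Relation.reflTransGen_iff_eq (by intro b hb; rcases hb with h | h <;> simp at h)]
  exact eq_comm

theorem pvConn_mono {E E2 : List (Nat × Nat)} {x y : Nat} (h : pvConn E x y) :
    pvConn (E ++ E2) x y := by
  refine Relation.ReflTransGen.mono ?_ h
  intro a b hab
  rcases hab with h1 | h1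
  · exact Or.inl (List.mem_append_left _ h1)
  · exact Or.inr (List.mem_append_left _ h1)

theorem pvConn_append_single {P : List (Nat × Nat)} {p q x y : Nat} :
    pvConn (P ++ [(p, q)]) x y ↔
      pvConn P x y ∨ (pvConn P x p ∧ pvConn P q y) ∨ (pvConn P x q ∧ pvConn P p y) := by
  constructor
  · intro h
    induction h with
    | refl => exact Or.inl Relation.ReflTransGen.refl
    | @tail b c hxb hbc ih =>
      have hstep : pvEstep P b c ∨ (b = p ∧ c = q) ∨ (b = q ∧ c = p) := by
        rcases hbc with h1 | h1 <;> rw [List.mem_append] at h1 <;> rcases h1 with h1 | h1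
        · exact Or.inl (Or.inl h1)
        · simp only [List.mem_singleton, Prod.mk.injEq] at h1
          exact Or.inr (Or.inl ⟨h1.1, h1.2⟩)
        · exact Or.inl (Or.inr h1)
        · simp only [List.mem_singleton, Prod.mk.injEq] at h1
          exact Or.inr (Or.inr ⟨h1.2, h1.1⟩)
      rcases hstep with hs | ⟨hb, hc⟩ | ⟨hb, hc⟩
      · rcases ih with h | ⟨h1, h2⟩ | ⟨h1, h2⟩
        · exact Or.inl (h.tail hs)
        · exact Or.inr (Or.inl ⟨h1, h2.tail hs⟩)
        · exact Or.inr (Or.inr ⟨h1, h2.tail hs⟩)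
      · subst hb; subst hc
        rcases ih with h | ⟨h1, _⟩ | ⟨h1, _⟩
        · exact Or.inr (Or.inl ⟨h, Relation.ReflTransGen.refl⟩)
        · exact Or.inr (Or.inl ⟨h1, Relation.ReflTransGen.refl⟩)
        · exact Or.inl h1
      · subst hb; subst hc
        rcases ih with h | ⟨h1, _⟩ | ⟨h1, _⟩
        · exact Or.inr (Or.inr ⟨h, Relation.ReflTransGen.refl⟩)
        · exact Or.inl h1
        · exact Or.inr (Or.inr ⟨h1, Relation.ReflTransGen.refl⟩)
  · have hedge : pvConn (P ++ [(p, q)]) p q :=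
      Relation.ReflTransGen.single (Or.inl (List.mem_append_right _ (List.mem_singleton.2 rfl)))
    rintro (h | ⟨h1, h2⟩ | ⟨h1, h2⟩)
    · exact pvConn_mono h
    · exact ((pvConn_mono h1).trans hedge).trans (pvConn_mono h2)
    · exact ((pvConn_mono h1).trans (pvConn_symm hedge)).trans (pvConn_mono h2)

theorem pvGet_eq {α : Type} (d : α) {l : List α} {i : Int} (h : PySem.Raise.InRange l.length i) :
    PySem.List.pyGet? l i = some (l.getD (pvNrm l.length i) d) := by
  rw [PySem.List.pyGet?, pvIdx_eq h, Option.bind_some,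
    List.getElem?_eq_getElem (pvNrm_lt h), List.getD_eq_getElem _ _ (pvNrm_lt h)]

theorem pvSetD_eq {α : Type} {l : List α} {i : Int} (v : α) (h : PySem.Raise.InRange l.length i) :
    PySem.List.pySetD l i v = l.set (pvNrm l.length i) v := by
  rw [PySem.List.pySetD, PySem.List.pySet?, pvIdx_eq h]
  rfl

theorem pvGetD_set_ne {α : Type} (l : List α) (j : Nat) (v d : α) (x : Nat) (hx : x ≠ j) :
    (l.set j v).getD x d = l.getD x d := by
  rcases Nat.lt_or_ge x l.length with h | h
  · rw [List.getD_eq_getElem _ d (by rw [List.length_set]; exact h), List.getD_eq_getElem _ d h,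
      List.getElem_set, if_neg (fun hj => hx hj.symm)]
  · rw [List.getD_eq_getElem?_getD, List.getD_eq_getElem?_getD,
      List.getElem?_eq_none (by rw [List.length_set]; exact h), List.getElem?_eq_none h]

theorem pvGetD_set_self {α : Type} (l : List α) (j : Nat) (v d : α) (hj : j < l.length) :
    (l.set j v).getD j d = v := by
  rw [List.getD_eq_getElem _ d (by rw [List.length_set]; exact hj), List.getElem_set, if_pos rfl]

theorem pvGetD_modify_ne (l : List Int) (i : Nat) (f : Int → Int) (t : Nat) (ht : t ≠ i) :
    (l.modify i f).getD t 0 = l.getD t 0 := by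
  rcases Nat.lt_or_ge t l.length with h | h
  · rw [List.getD_eq_getElem _ 0 (by rw [List.length_modify]; exact h), List.getD_eq_getElem _ 0 h,
      List.getElem_modify, if_neg (fun hj => ht hj.symm)]
  · rw [List.getD_eq_getElem?_getD, List.getD_eq_getElem?_getD,
      List.getElem?_eq_none (by rw [List.length_modify]; exact h), List.getElem?_eq_none h]

theorem pvGetD_modify_self (l : List Int) (i : Nat) (f : Int → Int) (hi : i < l.length) :
    (l.modify i f).getD i 0 = f (l.getD i 0) := by
  rw [List.getD_eq_getElem _ 0 (by rw [List.length_modify]; exact hi), List.getD_eq_getElem _ 0 hi,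
    List.getElem_modify, if_pos rfl]

theorem pvCountP_flip (p q : Nat → Bool) (j : Nat) (hpq : ∀ x, x ≠ j → p x = q x)
    (hp : p j = true) (hqf : q j = false) :
    ∀ n', j < n' → (List.range n').countP p = (List.range n').countP q + 1 := by
  intro n' hj
  induction n' with
  | zero => omega
  | succ nn ih =>
    rw [List.range_succ, List.countP_append, List.countP_append]
    rcases Nat.lt_or_ge j nn with h | h
    · have hrec := ih h
      have hn : p nn = q nn := hpq nn (by omega)
      simp only [List.countP_cons, List.countP_nil, hn]
      omega
    · have hjn : j = nn := by omega
      subst hjn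
      have hsame : (List.range j).countP p = (List.range j).countP q :=
        List.countP_congr (fun x hx => by
          rw [List.mem_range] at hx
          rw [hpq x (by omega)])
      simp [List.countP_cons, hp, hqf, hsame]

theorem pvFoldl_cons_mem (g : Int → Bool) (nbrs : List Int) :
    ∀ (q0 : List Int) (x : Int),
    (x ∈ nbrs.foldl (fun q i => if g i then q else i :: q) q0) ↔
      (x ∈ q0 ∨ (x ∈ nbrs ∧ g x = false)) := by
  induction nbrs with
  | nil => simp
  | cons i is ih =>
    intro q0 x
    simp only [List.foldl_cons]
    by_cases hgi : g i = true
    · rw [if_pos hgi, ih]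
      constructor
      · rintro (h | ⟨h1, h2⟩)
        · exact Or.inl h
        · exact Or.inr ⟨List.mem_cons_of_mem _ h1, h2⟩
      · rintro (h | ⟨h1, h2⟩)
        · exact Or.inl h
        · rcases List.mem_cons.1 h1 with h3 | h3
          · subst h3; rw [hgi] at h2; exact absurd h2 (by simp)
          · exact Or.inr ⟨h3, h2⟩
    · rw [if_neg hgi, ih]
      rw [Bool.not_eq_true] at hgi
      constructor
      · rintro (h | ⟨h1, h2⟩)
        · rcases List.mem_cons.1 h with h3 | h3
          · subst h3; exact Or.inr ⟨List.mem_cons_self .., hgi⟩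
          · exact Or.inl h3
        · exact Or.inr ⟨List.mem_cons_of_mem _ h1, h2⟩
      · rintro (h | ⟨h1, h2⟩)
        · exact Or.inl (List.mem_cons_of_mem _ h)
        · rcases List.mem_cons.1 h1 with h3 | h3
          · subst h3; exact Or.inl (List.mem_cons_self ..)
          · exact Or.inr ⟨h3, h2⟩

theorem pvConnB_eq_true {E : List (Nat × Nat)} {x y : Nat} :
    pvConnB E x y = true ↔ pvConn E x y := by
  unfold pvConnB
  exact @decide_eq_true_iff _ (Classical.propDecidable _)

-- ---------- B side: the label array's equality kernel is connectivity ----------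

theorem pvIte_eq_iff {a b cx cy : Int} (hab : a ≠ b) :
    ((if cx = a then b else cx) = (if cy = a then b else cy)) ↔
      (cx = cy ∨ (cx = a ∧ cy = b) ∨ (cx = b ∧ cy = a)) := by
  by_cases h1 : cx = a <;> by_cases h2 : cy = a <;>
    simp only [h1, h2, if_pos, if_neg, ite_true, ite_false] <;>
    constructor <;> intro h <;> first
      | tauto
      | (rcases h with h | ⟨hu, hv⟩ | ⟨hu, hv⟩ <;> tauto)

theorem pvComp_inv (n' : Nat) (links : List (Int × Int)) :
    ∀ (P : List (Nat × Nat)) (comp : List Int),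
    comp.length = n' →
    (∀ x y, x < n' → y < n' → (comp.getD x 0 = comp.getD y 0 ↔ pvConn P x y)) →
    (∀ p ∈ links, PySem.Raise.InRange n' (p.1 - 1) ∧ PySem.Raise.InRange n' (p.2 - 1)) →
    (links.foldl
      (fun comp vw =>
        match PySem.List.pyGet? comp (vw.1 - 1), PySem.List.pyGet? comp (vw.2 - 1) with
        | some a, some b => if a ≠ b then comp.map (fun c => if c = a then b else c) else comp
        | _, _ => comp) comp).length = n' ∧
    (∀ x y, x < n' → y < n' →
      ((links.foldl
        (fun comp vw =>
          match PySem.List.pyGet? comp (vw.1 - 1), PySem.List.pyGet? comp (vw.2 - 1) with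
          | some a, some b => if a ≠ b then comp.map (fun c => if c = a then b else c) else comp
          | _, _ => comp) comp).getD x 0 =
       (links.foldl
        (fun comp vw =>
          match PySem.List.pyGet? comp (vw.1 - 1), PySem.List.pyGet? comp (vw.2 - 1) with
          | some a, some b => if a ≠ b then comp.map (fun c => if c = a then b else c) else comp
          | _, _ => comp) comp).getD y 0 ↔ pvConn (P ++ pvE n' links) x y)) := by
  induction links with
  | nil =>
    intro P comp hlen hchar _
    simp only [List.foldl_nil, pvE, List.map_nil, List.append_nil]
    exact ⟨hlen, hchar⟩
  | cons vw ls ih =>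
    intro P comp hlen hchar hok
    have h1 : PySem.Raise.InRange comp.length (vw.1 - 1) := by
      rw [hlen]; exact (hok vw (List.mem_cons_self ..)).1
    have h2 : PySem.Raise.InRange comp.length (vw.2 - 1) := by
      rw [hlen]; exact (hok vw (List.mem_cons_self ..)).2
    have hpn : pvNrm n' (vw.1 - 1) < n' := hlen ▸ pvNrm_lt h1
    have hqn : pvNrm n' (vw.2 - 1) < n' := hlen ▸ pvNrm_lt h2
    have hgp : PySem.List.pyGet? comp (vw.1 - 1) = some (comp.getD (pvNrm n' (vw.1 - 1)) 0) := by
      rw [pvGet_eq 0 h1, hlen]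
    have hgq : PySem.List.pyGet? comp (vw.2 - 1) = some (comp.getD (pvNrm n' (vw.2 - 1)) 0) := by
      rw [pvGet_eq 0 h2, hlen]
    have hPP : P ++ pvE n' (vw :: ls) = (P ++ [(pvNrm n' (vw.1 - 1), pvNrm n' (vw.2 - 1))]) ++ pvE n' ls := by
      show P ++ ((pvNrm n' (vw.1 - 1), pvNrm n' (vw.2 - 1)) :: pvE n' ls) = _
      rw [List.append_cons]
    rw [hPP]
    simp only [List.foldl_cons, hgp, hgq]
    by_cases hab : comp.getD (pvNrm n' (vw.1 - 1)) 0 = comp.getD (pvNrm n' (vw.2 - 1)) 0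
    · -- labels equal: the new edge joins an already-joined pair, nothing changes
      have hconnpq : pvConn P (pvNrm n' (vw.1 - 1)) (pvNrm n' (vw.2 - 1)) :=
        (hchar _ _ hpn hqn).1 hab
      have hchar' : ∀ x y, x < n' → y < n' →
          (comp.getD x 0 = comp.getD y 0 ↔
            pvConn (P ++ [(pvNrm n' (vw.1 - 1), pvNrm n' (vw.2 - 1))]) x y) := by
        intro x y hx hy
        rw [hchar x y hx hy, pvConn_append_single]
        constructor
        · exact Or.inl
        · rintro (h | ⟨ha, hb⟩ | ⟨ha, hb⟩)
          · exact h
          · exact (ha.trans hconnpq).trans hb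
          · exact (ha.trans (pvConn_symm hconnpq)).trans hb
      rw [if_neg (fun hne => hne hab)]
      exact ih _ comp hlen hchar' (fun e he => hok e (List.mem_cons_of_mem _ he))
    · -- labels differ: relabel a-labelled cells to b
      rw [if_pos (fun h => hab h)]
      have hlen' : (comp.map (fun c =>
          if c = comp.getD (pvNrm n' (vw.1 - 1)) 0 then comp.getD (pvNrm n' (vw.2 - 1)) 0 else c)).length = n' := by
        rw [List.length_map, hlen]
      have hgetm : ∀ x, x < n' → (comp.map (fun c =>
          if c = comp.getD (pvNrm n' (vw.1 - 1)) 0 then comp.getD (pvNrm n' (vw.2 - 1)) 0 else c)).getD x 0 =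
          (if comp.getD x 0 = comp.getD (pvNrm n' (vw.1 - 1)) 0 then comp.getD (pvNrm n' (vw.2 - 1)) 0 else comp.getD x 0) := by
        intro x hx
        have hx1 : x < comp.length := by rw [hlen]; exact hx
        have hx2 : x < (comp.map (fun c =>
            if c = comp.getD (pvNrm n' (vw.1 - 1)) 0 then comp.getD (pvNrm n' (vw.2 - 1)) 0 else c)).length := by
          rw [List.length_map]; exact hx1
        rw [List.getD_eq_getElem _ 0 hx2, List.getElem_map, List.getD_eq_getElem comp 0 hx1]
      have hchar' : ∀ x y, x < n' → y < n' →
          ((comp.map (fun c =>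
            if c = comp.getD (pvNrm n' (vw.1 - 1)) 0 then comp.getD (pvNrm n' (vw.2 - 1)) 0 else c)).getD x 0 =
           (comp.map (fun c =>
            if c = comp.getD (pvNrm n' (vw.1 - 1)) 0 then comp.getD (pvNrm n' (vw.2 - 1)) 0 else c)).getD y 0 ↔
            pvConn (P ++ [(pvNrm n' (vw.1 - 1), pvNrm n' (vw.2 - 1))]) x y) := by
        intro x y hx hy
        rw [hgetm x hx, hgetm y hy, pvIte_eq_iff hab, pvConn_append_single]
        have cxp := hchar x (pvNrm n' (vw.1 - 1)) hx hpn
        have cyp := hchar y (pvNrm n' (vw.1 - 1)) hy hpn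
        have cxq := hchar x (pvNrm n' (vw.2 - 1)) hx hqn
        have cyq := hchar y (pvNrm n' (vw.2 - 1)) hy hqn
        have cxy := hchar x y hx hy
        constructor
        · rintro (h | ⟨hu, hv⟩ | ⟨hu, hv⟩)
          · exact Or.inl (cxy.1 h)
          · exact Or.inr (Or.inl ⟨cxp.1 hu, pvConn_symm (cyq.1 hv)⟩)
          · exact Or.inr (Or.inr ⟨cxq.1 hu, pvConn_symm (cyp.1 hv)⟩)
        · rintro (h | ⟨hu, hv⟩ | ⟨hu, hv⟩)
          · exact Or.inl (cxy.2 h)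
          · exact Or.inr (Or.inl ⟨cxp.2 hu, cyq.2 (pvConn_symm hv)⟩)
          · exact Or.inr (Or.inr ⟨cxq.2 hu, cyp.2 (pvConn_symm hv)⟩)
      exact ih _ _ hlen' hchar' (fun e he => hok e (List.mem_cons_of_mem _ he))

-- first-occurrence positions of a list
def pvFirst (l : List Int) : List Nat :=
  (List.range l.length).filter (fun x => !(decide (l.getD x 0 ∈ l.take x)))

theorem pvOfList_eq_first (l : List Int) :
    PySem.Set.ofList l = (pvFirst l).map (fun j => l.getD j 0) := by
  induction l using List.reverseRecOn with
  | nil => rfl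
  | append_singleton l a ih =>
    rw [PySem.Set.ofList_append_singleton, ih]
    have htake : ∀ x : Nat, x ≤ l.length → (l ++ [a]).take x = l.take x := fun x hx =>
      List.take_append_of_le_length hx
    have hgetlt : ∀ x : Nat, x < l.length → (l ++ [a]).getD x 0 = l.getD x 0 := by
      intro x hx
      rw [List.getD_eq_getElem _ 0 (by simp; omega), List.getD_eq_getElem _ 0 hx,
        List.getElem_append_left hx]
    have hgetlen : (l ++ [a]).getD l.length 0 = a := by
      rw [List.getD_eq_getElem _ 0 (by simp), List.getElem_concat_length rfl]
    have hfirst : pvFirst (l ++ [a]) =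
        pvFirst l ++ (if a ∈ l then [] else [l.length]) := by
      unfold pvFirst
      rw [List.length_append, List.length_singleton, List.range_succ, List.filter_append]
      congr 1
      · exact List.filter_congr (by
          intro x hx
          rw [List.mem_range] at hx
          rw [hgetlt x hx, htake x (Nat.le_of_lt hx)])
      · rw [List.filter_singleton]
        rw [hgetlen, htake l.length le_rfl, List.take_length]
        by_cases hmem : a ∈ l <;> simp [hmem]
    rw [hfirst, List.map_append]
    have hmap1 : (pvFirst l).map (fun j => (l ++ [a]).getD j 0) =
        (pvFirst l).map (fun j => l.getD j 0) := by
      refine List.map_congr_left ?_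
      intro j hj
      unfold pvFirst at hj
      have : j < l.length := by
        have := List.mem_of_mem_filter hj
        rwa [List.mem_range] at this
      exact hgetlt j this
    rw [hmap1]
    by_cases hmem : a ∈ l
    · have hcont : (PySem.Set.ofList l).contains a = true :=
        (PySem.Set.contains_iff _ a).2 ((PySem.Set.mem_ofList _ a).2 hmem)
      rw [if_pos hmem]
      simp only [List.map_nil, List.append_nil]
      unfold PySem.Set.add
      rw [ih] at hcont
      rw [if_pos hcont]
    · have hcont : ¬ ((PySem.Set.ofList l).contains a = true) := by
        rw [PySem.Set.contains_iff, PySem.Set.mem_ofList]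
        exact hmem
      rw [if_neg hmem]
      unfold PySem.Set.add
      rw [ih] at hcont
      rw [if_neg hcont]
      simp only [List.map_cons, List.map_nil, hgetlen]

-- ---------- A side: the stack DFS visits exactly the component of its root ----------

theorem pvDfs_correct
    (n' : Nat) (E : List (Nat × Nat)) (adj : List (List Int))
    (hadjlen : adj.length = n')
    (hadjIn : ∀ j, j < n' → ∀ i ∈ adj.getD j [], PySem.Raise.InRange n' i)
    (hadjE : ∀ j, j < n' → ∀ y, y < n' →
        ((∃ i ∈ adj.getD j [], pvNrm n' i = y) ↔ pvEstep E j y))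
    (hE : ∀ e ∈ E, e.1 < n' ∧ e.2 < n')
    (root : Nat) (hroot : root < n')
    (vis0 : List Bool) (hvis0len : vis0.length = n')
    (hclosed : ∀ x y, x < n' → y < n' → vis0.getD x false = true → pvEstep E x y →
        vis0.getD y false = true)
    (hdisj : ∀ x, x < n' → pvConn E root x → vis0.getD x false = false) :
    ∀ (vis : List Bool) (acc : List Int) (cc : Nat) (queue : List Int),
    vis.length = n' → acc.length = n' → cc < n' →
    (∀ x, x < n' → vis0.getD x false = true → vis.getD x false = true) →
    (∀ x, x < n' → vis.getD x false = true → vis0.getD x false = true ∨ pvConn E root x) →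
    (∀ q ∈ queue, PySem.Raise.InRange n' q ∧ pvConn E root (pvNrm n' q)) →
    (∀ x, x < n' → vis.getD x false = true → vis0.getD x false = false →
      ∀ y, y < n' → pvEstep E x y →
        vis.getD y false = true ∨ ∃ q ∈ queue, pvNrm n' q = y) →
    (vis.getD root false = true ∨ ∃ q ∈ queue, pvNrm n' q = root) →
    (pvDfs adj vis acc cc queue).1.length = n' ∧
    (pvDfs adj vis acc cc queue).2.length = n' ∧
    (∀ x, x < n' → ((pvDfs adj vis acc cc queue).1.getD x false = true ↔
        (vis.getD x false = true ∨ pvConn E root x))) ∧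
    (∀ j, j ≠ cc → (pvDfs adj vis acc cc queue).2.getD j 0 = acc.getD j 0) ∧
    ((pvDfs adj vis acc cc queue).2.getD cc 0 = acc.getD cc 0 +
      ((List.range n').countP (fun x => pvConnB E root x && !(vis.getD x false)) : Int)) := by
  intro vis acc cc queue
  fun_induction pvDfs adj vis acc cc queue with
  | case1 vis acc =>
    intro hvlen halen hcc hmono hnew hq hfront hcover
    have hvisited : ∀ x, pvConn E root x → x < n' → vis.getD x false = true := by
      intro x hconn
      induction hconn with
      | refl =>
        intro _
        rcases hcover with hv | ⟨q, hq1, -⟩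
        · exact hv
        · simp at hq1
      | @tail b c hxb hbc ihb =>
        intro hcn
        have hbn : b < n' := by
          rcases hbc with h1 | h1
          · exact (hE _ h1).1
          · exact (hE _ h1).2
        have hvb := ihb hbn
        have hv0b : vis0.getD b false = false := hdisj b hbn hxb
        rcases hfront b hbn hvb hv0b c hcn hbc with hv | ⟨q, hq1, -⟩
        · exact hv
        · simp at hq1
    refine ⟨hvlen, halen, ?_, fun j _ => rfl, ?_⟩
    · intro x hx
      constructor
      · exact Or.inl
      · rintro (hv | hv)
        · exact hv
        · exact hvisited x hv hx
    · have hzero : (List.range n').countP (fun x => pvConnB E root x && !(vis.getD x false)) = 0 := by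
        rw [List.countP_eq_zero]
        intro a ha hpa
        rw [List.mem_range] at ha
        rw [Bool.and_eq_true, pvConnB_eq_true, Bool.not_eq_true'] at hpa
        obtain ⟨hc, hvf⟩ := hpa
        rw [hvisited a hc ha] at hvf
        simp at hvf
      rw [hzero]
      simp
  | case2 vis acc node rest h =>
    intro hvlen halen hcc hmono hnew hq hfront hcover
    have hin : PySem.Raise.InRange vis.length node := by
      rw [hvlen]; exact (hq node (List.mem_cons_self ..)).1
    rw [pvGet_eq false hin] at h
    exact absurd h (by simp)
  | case3 vis acc node rest h ih =>
    intro hvlen halen hcc hmono hnew hq hfront hcover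
    have hin : PySem.Raise.InRange vis.length node := by
      rw [hvlen]; exact (hq node (List.mem_cons_self ..)).1
    have hmTrue : vis.getD (pvNrm n' node) false = true := by
      rw [pvGet_eq false hin, hvlen] at h
      exact Option.some.inj h
    refine ih hvlen halen hcc hmono hnew (fun q hqm => hq q (List.mem_cons_of_mem _ hqm)) ?_ ?_
    · intro x hx hvx hv0x y hy hstep
      rcases hfront x hx hvx hv0x y hy hstep with hv | ⟨q, hqm, hnrm⟩
      · exact Or.inl hv
      · rcases List.mem_cons.1 hqm with rfl | hqr
        · exact Or.inl (hnrm ▸ hmTrue)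
        · exact Or.inr ⟨q, hqr, hnrm⟩
    · rcases hcover with hv | ⟨q, hqm, hnrm⟩
      · exact Or.inl hv
      · rcases List.mem_cons.1 hqm with rfl | hqr
        · exact Or.inl (hnrm ▸ hmTrue)
        · exact Or.inr ⟨q, hqr, hnrm⟩
  | case4 vis acc node rest h ih =>
    intro hvlen halen hcc hmono hnew hq hfront hcover
    simp only [dite_eq_ite] at ih
    have hin : PySem.Raise.InRange vis.length node := by
      rw [hvlen]; exact (hq node (List.mem_cons_self ..)).1
    have hinn : PySem.Raise.InRange n' node := by rw [← hvlen]; exact hin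
    have hjn : pvNrm n' node < n' := pvNrm_lt hinn
    have hjfalse : vis.getD (pvNrm n' node) false = false := by
      rw [pvGet_eq false hin, hvlen] at h
      exact Option.some.inj h
    have hconnj : pvConn E root (pvNrm n' node) := (hq node (List.mem_cons_self ..)).2
    have hset : PySem.List.pySetD vis node true = vis.set (pvNrm n' node) true := by
      rw [pvSetD_eq true hin, hvlen]
    have hvlen' : (PySem.List.pySetD vis node true).length = n' := by
      rw [hset, List.length_set]; exact hvlen
    have hvis' : ∀ x, (PySem.List.pySetD vis node true).getD x false =
        (if x = pvNrm n' node then true else vis.getD x false) := by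
      intro x
      rw [hset]
      by_cases hx : x = pvNrm n' node
      · subst hx
        rw [if_pos rfl, pvGetD_set_self _ _ _ _ (by rw [hvlen]; exact hjn)]
      · rw [if_neg hx, pvGetD_set_ne _ _ _ _ _ hx]
    have hnbrs : (PySem.List.pyGet? adj node).getD [] = adj.getD (pvNrm n' node) [] := by
      have hina : PySem.Raise.InRange adj.length node := by rw [hadjlen]; exact hinn
      rw [pvGet_eq [] hina, hadjlen]
      rfl
    have hqmem : ∀ x, (x ∈ ((PySem.List.pyGet? adj node).getD []).foldl
        (fun q i => if PySem.List.pyGetD (PySem.List.pySetD vis node true) i true then q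
          else i :: q) rest) ↔
        (x ∈ rest ∨ (x ∈ adj.getD (pvNrm n' node) [] ∧
          PySem.List.pyGetD (PySem.List.pySetD vis node true) x true = false)) := by
      intro x
      rw [hnbrs]
      exact pvFoldl_cons_mem _ _ rest x
    have hgetD' : ∀ i, PySem.Raise.InRange n' i →
        PySem.List.pyGetD (PySem.List.pySetD vis node true) i true =
          (PySem.List.pySetD vis node true).getD (pvNrm n' i) false := by
      intro i hi
      have hi' : PySem.Raise.InRange (PySem.List.pySetD vis node true).length i := by
        rw [hvlen']; exact hi
      rw [PySem.List.pyGetD, pvGet_eq false hi', hvlen']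
      rfl
    have hmono' : ∀ x, x < n' → vis0.getD x false = true →
        (PySem.List.pySetD vis node true).getD x false = true := by
      intro x hx h0
      rw [hvis' x]
      by_cases hxj : x = pvNrm n' node
      · rw [if_pos hxj]
      · rw [if_neg hxj]; exact hmono x hx h0
    have hnew' : ∀ x, x < n' → (PySem.List.pySetD vis node true).getD x false = true →
        vis0.getD x false = true ∨ pvConn E root x := by
      intro x hx hvx
      rw [hvis' x] at hvx
      by_cases hxj : x = pvNrm n' node
      · subst hxj; exact Or.inr hconnj
      · rw [if_neg hxj] at hvx; exact hnew x hx hvx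
    have hq' : ∀ q ∈ ((PySem.List.pyGet? adj node).getD []).foldl
        (fun q i => if PySem.List.pyGetD (PySem.List.pySetD vis node true) i true then q
          else i :: q) rest,
        PySem.Raise.InRange n' q ∧ pvConn E root (pvNrm n' q) := by
      intro q hqm
      rw [hqmem q] at hqm
      rcases hqm with hqr | ⟨hmemadj, -⟩
      · exact hq q (List.mem_cons_of_mem _ hqr)
      · have hiin : PySem.Raise.InRange n' q := hadjIn _ hjn q hmemadj
        have hstep : pvEstep E (pvNrm n' node) (pvNrm n' q) :=
          (hadjE _ hjn (pvNrm n' q) (pvNrm_lt hiin)).1 ⟨q, hmemadj, rfl⟩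
        exact ⟨hiin, hconnj.tail hstep⟩
    have hfront' : ∀ x, x < n' → (PySem.List.pySetD vis node true).getD x false = true →
        vis0.getD x false = false → ∀ y, y < n' → pvEstep E x y →
        (PySem.List.pySetD vis node true).getD y false = true ∨
          ∃ q ∈ ((PySem.List.pyGet? adj node).getD []).foldl
            (fun q i => if PySem.List.pyGetD (PySem.List.pySetD vis node true) i true then q
              else i :: q) rest, pvNrm n' q = y := by
      intro x hx hvx hv0x y hy hstep
      by_cases hxj : x = pvNrm n' node
      · subst hxj
        obtain ⟨i, hi1, hi2⟩ := (hadjE _ hjn y hy).2 hstep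
        have hiin : PySem.Raise.InRange n' i := hadjIn _ hjn i hi1
        by_cases hgv : (PySem.List.pySetD vis node true).getD (pvNrm n' i) false = true
        · exact Or.inl (hi2 ▸ hgv)
        · refine Or.inr ⟨i, ?_, hi2⟩
          rw [hqmem i]
          refine Or.inr ⟨hi1, ?_⟩
          rw [hgetD' i hiin]
          exact Bool.not_eq_true _ ▸ hgv
      · rw [hvis' x, if_neg hxj] at hvx
        rcases hfront x hx hvx hv0x y hy hstep with hv | ⟨q, hqm, hnrm⟩
        · refine Or.inl ?_
          rw [hvis' y]
          by_cases hyj : y = pvNrm n' node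
          · rw [if_pos hyj]
          · rw [if_neg hyj]; exact hv
        · rcases List.mem_cons.1 hqm with rfl | hqr
          · refine Or.inl ?_
            rw [hvis' y, if_pos hnrm.symm]
          · refine Or.inr ⟨q, ?_, hnrm⟩
            rw [hqmem q]
            exact Or.inl hqr
    have hcover' : (PySem.List.pySetD vis node true).getD root false = true ∨
        ∃ q ∈ ((PySem.List.pyGet? adj node).getD []).foldl
          (fun q i => if PySem.List.pyGetD (PySem.List.pySetD vis node true) i true then q
            else i :: q) rest, pvNrm n' q = root := by
      rcases hcover with hv | ⟨q, hqm, hnrm⟩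
      · refine Or.inl ?_
        rw [hvis' root]
        by_cases hr : root = pvNrm n' node
        · rw [if_pos hr]
        · rw [if_neg hr]; exact hv
      · rcases List.mem_cons.1 hqm with rfl | hqr
        · refine Or.inl ?_
          rw [hvis' root, if_pos hnrm.symm]
        · exact Or.inr ⟨q, by rw [hqmem q]; exact Or.inl hqr, hnrm⟩
    have halen' : (acc.modify cc (· + 1)).length = n' := by
      rw [List.length_modify]; exact halen
    obtain ⟨H1, H2, H3, H4, H5⟩ := ih hvlen' halen' hcc hmono' hnew' hq' hfront' hcover'
    refine ⟨H1, H2, ?_, ?_, ?_⟩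
    · intro x hx
      rw [H3 x hx, hvis' x]
      by_cases hxj : x = pvNrm n' node
      · subst hxj
        rw [if_pos rfl]
        simp [hconnj]
      · rw [if_neg hxj]
    · intro t ht
      rw [H4 t ht, pvGetD_modify_ne _ _ _ _ ht]
    · rw [H5, pvGetD_modify_self _ _ _ (by rw [halen]; exact hcc)]
      have hflip : (List.range n').countP (fun x => pvConnB E root x && !(vis.getD x false)) =
          (List.range n').countP
            (fun x => pvConnB E root x && !((PySem.List.pySetD vis node true).getD x false)) + 1 := by
        refine pvCountP_flip _ _ (pvNrm n' node) ?_ ?_ ?_ n' hjn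
        · intro x hx
          rw [hvis' x, if_neg hx]
        · rw [hjfalse, pvConnB_eq_true.2 hconnj]
          rfl
        · rw [hvis' _, if_pos rfl, pvConnB_eq_true.2 hconnj]
          rfl
      rw [hflip]
      push_cast
      ring

theorem pvMinB_eq_true {E : List (Nat × Nat)} {i : Nat} :
    pvMinB E i = true ↔ ¬ ∃ j, j < i ∧ pvConn E j i := by
  constructor
  · intro h hex
    obtain ⟨j, hj, hc⟩ := hex
    have hany : (List.range i).any (fun y => pvConnB E y i) = true :=
      List.any_eq_true.2 ⟨j, List.mem_range.2 hj, pvConnB_eq_true.2 hc⟩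
    rw [pvMinB, hany] at h
    simp at h
  · intro h
    have hany : (List.range i).any (fun y => pvConnB E y i) = false := by
      rw [← Bool.not_eq_true, List.any_eq_true]
      rintro ⟨j, hjm, hc⟩
      exact h ⟨j, List.mem_range.1 hjm, pvConnB_eq_true.1 hc⟩
    rw [pvMinB, hany]
    rfl

theorem pvReps_succ_mem (E : List (Nat × Nat)) (i : Nat) (h : pvMinB E i = true) :
    pvReps E (i + 1) = pvReps E i ++ [i] := by
  unfold pvReps
  rw [List.range_succ, List.filter_append, List.filter_singleton, h]
  rfl

theorem pvReps_succ_not (E : List (Nat × Nat)) (i : Nat) (h : pvMinB E i = false) :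
    pvReps E (i + 1) = pvReps E i := by
  unfold pvReps
  rw [List.range_succ, List.filter_append, List.filter_singleton, h]
  simp

theorem pvBlocks_succ_not (E : List (Nat × Nat)) (n' i : Nat) (h : pvMinB E i = false) :
    pvBlocks E n' (i + 1) = pvBlocks E n' i := by
  unfold pvBlocks
  rw [pvReps_succ_not E i h]

theorem pvAddNbr_eq (adj : List (List Int)) (i j : Int) (h : PySem.Raise.InRange adj.length i) :
    pvAddNbr adj i j = adj.set (pvNrm adj.length i) (adj.getD (pvNrm adj.length i) [] ++ [j]) := by
  unfold pvAddNbr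
  rw [pvGet_eq [] h]
  show PySem.List.pySetD adj i _ = _
  exact pvSetD_eq _ h

theorem pvGetD_set_append_mem (adj : List (List Int)) (pp : Nat) (a : Int) (t : Nat)
    (hp : pp < adj.length) (i : Int) :
    (i ∈ (adj.set pp (adj.getD pp [] ++ [a])).getD t [] ↔
      (i ∈ adj.getD t [] ∨ (t = pp ∧ i = a))) := by
  by_cases htp : t = pp
  · subst htp
    rw [pvGetD_set_self _ _ _ _ hp]
    simp [List.mem_append]
  · rw [pvGetD_set_ne _ _ _ _ _ htp]
    simp [htp]

theorem pvAdj_inv (n' : Nat) (links : List (Int × Int)) :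
    ∀ (P : List (Nat × Nat)) (adj : List (List Int)),
    adj.length = n' →
    (∀ j, j < n' → ∀ i ∈ adj.getD j [], PySem.Raise.InRange n' i) →
    (∀ j, j < n' → ∀ y, y < n' → ((∃ i ∈ adj.getD j [], pvNrm n' i = y) ↔ pvEstep P j y)) →
    (∀ p ∈ links, PySem.Raise.InRange n' (p.1 - 1) ∧ PySem.Raise.InRange n' (p.2 - 1)) →
    (links.foldl (fun adj vw => pvAddNbr (pvAddNbr adj (vw.1 - 1) (vw.2 - 1)) (vw.2 - 1) (vw.1 - 1)) adj).length = n' ∧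
    (∀ j, j < n' → ∀ i ∈ (links.foldl (fun adj vw => pvAddNbr (pvAddNbr adj (vw.1 - 1) (vw.2 - 1)) (vw.2 - 1) (vw.1 - 1)) adj).getD j [],
      PySem.Raise.InRange n' i) ∧
    (∀ j, j < n' → ∀ y, y < n' →
      ((∃ i ∈ (links.foldl (fun adj vw => pvAddNbr (pvAddNbr adj (vw.1 - 1) (vw.2 - 1)) (vw.2 - 1) (vw.1 - 1)) adj).getD j [],
        pvNrm n' i = y) ↔ pvEstep (P ++ pvE n' links) j y)) := by
  induction links with
  | nil =>
    intro P adj hlen hIn hchar _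
    simp only [List.foldl_nil, pvE, List.map_nil, List.append_nil]
    exact ⟨hlen, hIn, hchar⟩
  | cons vw ls ih =>
    intro P adj hlen hIn hchar hok
    have h1 : PySem.Raise.InRange n' (vw.1 - 1) := (hok vw (List.mem_cons_self ..)).1
    have h2 : PySem.Raise.InRange n' (vw.2 - 1) := (hok vw (List.mem_cons_self ..)).2
    have hpn : pvNrm n' (vw.1 - 1) < n' := pvNrm_lt h1
    have hqn : pvNrm n' (vw.2 - 1) < n' := pvNrm_lt h2
    have hPP : P ++ pvE n' (vw :: ls) = (P ++ [(pvNrm n' (vw.1 - 1), pvNrm n' (vw.2 - 1))]) ++ pvE n' ls := by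
      show P ++ ((pvNrm n' (vw.1 - 1), pvNrm n' (vw.2 - 1)) :: pvE n' ls) = _
      rw [List.append_cons]
    have hadd1 : pvAddNbr adj (vw.1 - 1) (vw.2 - 1) =
        adj.set (pvNrm n' (vw.1 - 1)) (adj.getD (pvNrm n' (vw.1 - 1)) [] ++ [vw.2 - 1]) := by
      rw [pvAddNbr_eq adj _ _ (by rw [hlen]; exact h1), hlen]
    have hlen1 : (pvAddNbr adj (vw.1 - 1) (vw.2 - 1)).length = n' := by
      rw [hadd1, List.length_set]; exact hlen
    have hadd2 : pvAddNbr (pvAddNbr adj (vw.1 - 1) (vw.2 - 1)) (vw.2 - 1) (vw.1 - 1) =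
        (pvAddNbr adj (vw.1 - 1) (vw.2 - 1)).set (pvNrm n' (vw.2 - 1))
          ((pvAddNbr adj (vw.1 - 1) (vw.2 - 1)).getD (pvNrm n' (vw.2 - 1)) [] ++ [vw.1 - 1]) := by
      rw [pvAddNbr_eq _ _ _ (by rw [hlen1]; exact h2), hlen1]
    have hlen2 : (pvAddNbr (pvAddNbr adj (vw.1 - 1) (vw.2 - 1)) (vw.2 - 1) (vw.1 - 1)).length = n' := by
      rw [hadd2, List.length_set]; exact hlen1
    have hmem2 : ∀ t, ∀ i : Int,
        (i ∈ (pvAddNbr (pvAddNbr adj (vw.1 - 1) (vw.2 - 1)) (vw.2 - 1) (vw.1 - 1)).getD t [] ↔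
          (i ∈ adj.getD t [] ∨ (t = pvNrm n' (vw.1 - 1) ∧ i = vw.2 - 1) ∨
            (t = pvNrm n' (vw.2 - 1) ∧ i = vw.1 - 1))) := by
      intro t i
      rw [hadd2, pvGetD_set_append_mem _ _ _ _ (by rw [hlen1]; exact hqn),
        hadd1, pvGetD_set_append_mem _ _ _ _ (by rw [hlen]; exact hpn)]
      tauto
    have hIn' : ∀ j, j < n' → ∀ i ∈ (pvAddNbr (pvAddNbr adj (vw.1 - 1) (vw.2 - 1)) (vw.2 - 1) (vw.1 - 1)).getD j [],
        PySem.Raise.InRange n' i := by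
      intro j hj i hi
      rw [hmem2 j i] at hi
      rcases hi with hm | ⟨-, rfl⟩ | ⟨-, rfl⟩
      · exact hIn j hj i hm
      · exact h2
      · exact h1
    have hchar' : ∀ j, j < n' → ∀ y, y < n' →
        ((∃ i ∈ (pvAddNbr (pvAddNbr adj (vw.1 - 1) (vw.2 - 1)) (vw.2 - 1) (vw.1 - 1)).getD j [], pvNrm n' i = y) ↔
          pvEstep (P ++ [(pvNrm n' (vw.1 - 1), pvNrm n' (vw.2 - 1))]) j y) := by
      intro j hj y hy
      unfold pvEstep
      constructor
      · rintro ⟨i, hi, hni⟩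
        rw [hmem2 j i] at hi
        rcases hi with hm | ⟨ht1, ht2⟩ | ⟨ht1, ht2⟩
        · rcases (hchar j hj y hy).1 ⟨i, hm, hni⟩ with hs | hs
          · exact Or.inl (List.mem_append_left _ hs)
          · exact Or.inr (List.mem_append_left _ hs)
        · subst ht1
          subst ht2
          refine Or.inl (List.mem_append_right _ ?_)
          rw [List.mem_singleton, ← hni]
        · subst ht1
          subst ht2
          refine Or.inr (List.mem_append_right _ ?_)
          rw [List.mem_singleton, ← hni]
      · intro hs
        have hmm : pvEstep P j y ∨
            ((j, y) = (pvNrm n' (vw.1 - 1), pvNrm n' (vw.2 - 1)) ∨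
             (y, j) = (pvNrm n' (vw.1 - 1), pvNrm n' (vw.2 - 1))) := by
          rcases hs with hs | hs <;> rw [List.mem_append, List.mem_singleton] at hs
          · rcases hs with hs | hs
            · exact Or.inl (Or.inl hs)
            · exact Or.inr (Or.inl hs)
          · rcases hs with hs | hs
            · exact Or.inl (Or.inr hs)
            · exact Or.inr (Or.inr hs)
        rcases hmm with hs' | hs' | hs'
        · obtain ⟨i, hi, hni⟩ := (hchar j hj y hy).2 hs'
          exact ⟨i, (hmem2 j i).2 (Or.inl hi), hni⟩
        · have hj1 : j = pvNrm n' (vw.1 - 1) := congrArg Prod.fst hs'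
          have hy1 : y = pvNrm n' (vw.2 - 1) := congrArg Prod.snd hs'
          exact ⟨vw.2 - 1, (hmem2 j _).2 (Or.inr (Or.inl ⟨hj1, rfl⟩)), hy1.symm⟩
        · have hy1 : y = pvNrm n' (vw.1 - 1) := congrArg Prod.fst hs'
          have hj1 : j = pvNrm n' (vw.2 - 1) := congrArg Prod.snd hs'
          exact ⟨vw.1 - 1, (hmem2 j _).2 (Or.inr (Or.inr ⟨hj1, rfl⟩)), hy1.symm⟩
    rw [hPP]
    simp only [List.foldl_cons]
    exact ih _ _ hlen2 hIn' hchar' (fun e he => hok e (List.mem_cons_of_mem _ he))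

theorem pvGetD_replicate_zero (n' t : Nat) : (List.replicate n' (0 : Int)).getD t 0 = 0 := by
  rcases Nat.lt_or_ge t n' with h | h
  · rw [List.getD_replicate _ h]
  · rw [List.getD_eq_getElem?_getD, List.getElem?_eq_none (by simpa using h)]
    rfl

theorem pvOuter_inv (n' : Nat) (E : List (Nat × Nat)) (adj : List (List Int))
    (hadjlen : adj.length = n')
    (hadjIn : ∀ j, j < n' → ∀ i ∈ adj.getD j [], PySem.Raise.InRange n' i)
    (hadjE : ∀ j, j < n' → ∀ y, y < n' →
        ((∃ i ∈ adj.getD j [], pvNrm n' i = y) ↔ pvEstep E j y))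
    (hE : ∀ e ∈ E, e.1 < n' ∧ e.2 < n') :
    ∀ i, i ≤ n' →
    (((List.range i).foldl
      (fun s (i : Nat) =>
        if PySem.List.pyGetD s.1.1 (i : Int) false then s
        else
          let r := pvDfs adj s.1.1 s.1.2 s.2 [(i : Int)]
          ((r.1, r.2), s.2 + 1))
      ((List.replicate n' false, List.replicate n' (0 : Int)), 0))).1.1.length = n' ∧
    (((List.range i).foldl
      (fun s (i : Nat) =>
        if PySem.List.pyGetD s.1.1 (i : Int) false then s
        else
          let r := pvDfs adj s.1.1 s.1.2 s.2 [(i : Int)]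
          ((r.1, r.2), s.2 + 1))
      ((List.replicate n' false, List.replicate n' (0 : Int)), 0))).1.2.length = n' ∧
    (∀ x, x < n' → ((((List.range i).foldl
      (fun s (i : Nat) =>
        if PySem.List.pyGetD s.1.1 (i : Int) false then s
        else
          let r := pvDfs adj s.1.1 s.1.2 s.2 [(i : Int)]
          ((r.1, r.2), s.2 + 1))
      ((List.replicate n' false, List.replicate n' (0 : Int)), 0))).1.1.getD x false = true ↔ ∃ j, j < i ∧ pvConn E j x)) ∧
    (((List.range i).foldl
      (fun s (i : Nat) =>
        if PySem.List.pyGetD s.1.1 (i : Int) false then s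
        else
          let r := pvDfs adj s.1.1 s.1.2 s.2 [(i : Int)]
          ((r.1, r.2), s.2 + 1))
      ((List.replicate n' false, List.replicate n' (0 : Int)), 0))).2 = (pvReps E i).length ∧
    (∀ t, t < (pvReps E i).length →
      (((List.range i).foldl
      (fun s (i : Nat) =>
        if PySem.List.pyGetD s.1.1 (i : Int) false then s
        else
          let r := pvDfs adj s.1.1 s.1.2 s.2 [(i : Int)]
          ((r.1, r.2), s.2 + 1))
      ((List.replicate n' false, List.replicate n' (0 : Int)), 0))).1.2.getD t 0 = (pvBlocks E n' i).getD t 0) ∧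
    (∀ t, (pvReps E i).length ≤ t → (((List.range i).foldl
      (fun s (i : Nat) =>
        if PySem.List.pyGetD s.1.1 (i : Int) false then s
        else
          let r := pvDfs adj s.1.1 s.1.2 s.2 [(i : Int)]
          ((r.1, r.2), s.2 + 1))
      ((List.replicate n' false, List.replicate n' (0 : Int)), 0))).1.2.getD t 0 = 0) := by
  intro i
  induction i with
  | zero =>
    intro _
    simp only [List.range_zero, List.foldl_nil]
    refine ⟨by simp, by simp, ?_, by simp [pvReps], ?_, ?_⟩
    · intro x hx
      rw [List.getD_replicate _ hx]
      simp
    · intro t ht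
      simp [pvReps] at ht
    · intro t _
      exact pvGetD_replicate_zero n' t
  | succ i ihi =>
    intro hi1
    have hlt : i < n' := hi1
    obtain ⟨L1, L2, C, CC, B1, B2⟩ := ihi (Nat.le_of_lt hlt)
    rw [List.range_succ, List.foldl_append, List.foldl_cons, List.foldl_nil]
    have hcond : PySem.List.pyGetD ((List.range i).foldl
      (fun s (i : Nat) =>
        if PySem.List.pyGetD s.1.1 (i : Int) false then s
        else
          let r := pvDfs adj s.1.1 s.1.2 s.2 [(i : Int)]
          ((r.1, r.2), s.2 + 1))
      ((List.replicate n' false, List.replicate n' (0 : Int)), 0)).1.1 ((i : Nat) : Int) false =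
        ((List.range i).foldl
      (fun s (i : Nat) =>
        if PySem.List.pyGetD s.1.1 (i : Int) false then s
        else
          let r := pvDfs adj s.1.1 s.1.2 s.2 [(i : Int)]
          ((r.1, r.2), s.2 + 1))
      ((List.replicate n' false, List.replicate n' (0 : Int)), 0)).1.1.getD i false := by
      simp
    rw [hcond]
    by_cases hv : (((List.range i).foldl
      (fun s (i : Nat) =>
        if PySem.List.pyGetD s.1.1 (i : Int) false then s
        else
          let r := pvDfs adj s.1.1 s.1.2 s.2 [(i : Int)]
          ((r.1, r.2), s.2 + 1))
      ((List.replicate n' false, List.replicate n' (0 : Int)), 0))).1.1.getD i false = true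
    · rw [if_pos hv]
      obtain ⟨j0, hj0, hc0⟩ := (C i hlt).1 hv
      have hminf : pvMinB E i = false := by
        rw [← Bool.not_eq_true]
        intro hm
        exact (pvMinB_eq_true.1 hm) ⟨j0, hj0, hc0⟩
      rw [pvReps_succ_not E i hminf, pvBlocks_succ_not E n' i hminf]
      refine ⟨L1, L2, ?_, CC, B1, B2⟩
      intro x hx
      rw [C x hx]
      constructor
      · rintro ⟨j, hj, hc⟩
        exact ⟨j, by omega, hc⟩
      · rintro ⟨j, hj, hc⟩
        rcases Nat.lt_or_ge j i with hji | hji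
        · exact ⟨j, hji, hc⟩
        · have hji' : j = i := by omega
          subst hji'
          exact ⟨j0, hj0, hc0.trans hc⟩
    · rw [if_neg hv]
      have hvf : (((List.range i).foldl
      (fun s (i : Nat) =>
        if PySem.List.pyGetD s.1.1 (i : Int) false then s
        else
          let r := pvDfs adj s.1.1 s.1.2 s.2 [(i : Int)]
          ((r.1, r.2), s.2 + 1))
      ((List.replicate n' false, List.replicate n' (0 : Int)), 0))).1.1.getD i false = false := by
        rw [← Bool.not_eq_true]
        exact hv
      have hmint : pvMinB E i = true := by
        rw [pvMinB_eq_true]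
        rintro ⟨j, hj, hc⟩
        exact hv ((C i hlt).2 ⟨j, hj, hc⟩)
      have hcc : (((List.range i).foldl
      (fun s (i : Nat) =>
        if PySem.List.pyGetD s.1.1 (i : Int) false then s
        else
          let r := pvDfs adj s.1.1 s.1.2 s.2 [(i : Int)]
          ((r.1, r.2), s.2 + 1))
      ((List.replicate n' false, List.replicate n' (0 : Int)), 0))).2 < n' := by
        rw [CC]
        calc (pvReps E i).length ≤ (List.range i).length := List.length_filter_le _ _
        _ = i := List.length_range
        _ < n' := hlt
      have hdisj : ∀ x, x < n' → pvConn E i x → (((List.range i).foldl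
      (fun s (i : Nat) =>
        if PySem.List.pyGetD s.1.1 (i : Int) false then s
        else
          let r := pvDfs adj s.1.1 s.1.2 s.2 [(i : Int)]
          ((r.1, r.2), s.2 + 1))
      ((List.replicate n' false, List.replicate n' (0 : Int)), 0))).1.1.getD x false = false := by
        intro x hx hc
        rw [← Bool.not_eq_true]
        intro hvx
        obtain ⟨j, hj, hcj⟩ := (C x hx).1 hvx
        exact hv ((C i hlt).2 ⟨j, hj, hcj.trans (pvConn_symm hc)⟩)
      obtain ⟨D1, D2, D3, D4, D5⟩ :=
        pvDfs_correct n' E adj hadjlen hadjIn hadjE hE i hlt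
          (((List.range i).foldl
      (fun s (i : Nat) =>
        if PySem.List.pyGetD s.1.1 (i : Int) false then s
        else
          let r := pvDfs adj s.1.1 s.1.2 s.2 [(i : Int)]
          ((r.1, r.2), s.2 + 1))
      ((List.replicate n' false, List.replicate n' (0 : Int)), 0))).1.1 L1
          (by
            intro x y hx hy hvx hstep
            obtain ⟨j, hj, hcj⟩ := (C x hx).1 hvx
            exact (C y hy).2 ⟨j, hj, hcj.tail hstep⟩)
          hdisj
          (((List.range i).foldl
      (fun s (i : Nat) =>
        if PySem.List.pyGetD s.1.1 (i : Int) false then s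
        else
          let r := pvDfs adj s.1.1 s.1.2 s.2 [(i : Int)]
          ((r.1, r.2), s.2 + 1))
      ((List.replicate n' false, List.replicate n' (0 : Int)), 0))).1.1 (((List.range i).foldl
      (fun s (i : Nat) =>
        if PySem.List.pyGetD s.1.1 (i : Int) false then s
        else
          let r := pvDfs adj s.1.1 s.1.2 s.2 [(i : Int)]
          ((r.1, r.2), s.2 + 1))
      ((List.replicate n' false, List.replicate n' (0 : Int)), 0))).1.2 (((List.range i).foldl
      (fun s (i : Nat) =>
        if PySem.List.pyGetD s.1.1 (i : Int) false then s
        else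
          let r := pvDfs adj s.1.1 s.1.2 s.2 [(i : Int)]
          ((r.1, r.2), s.2 + 1))
      ((List.replicate n' false, List.replicate n' (0 : Int)), 0))).2 [(i : Int)]
          L1 L2 hcc
          (fun x hx hvx => hvx)
          (fun x hx hvx => Or.inl hvx)
          (by
            intro q hq
            rw [List.mem_singleton] at hq
            subst hq
            refine ⟨⟨by omega, by exact_mod_cast hlt⟩, ?_⟩
            have : pvNrm n' (i : Int) = i := by simp [pvNrm]
            rw [this]
            exact Relation.ReflTransGen.refl)
          (by
            intro x hx hvx hv0x
            rw [hvx] at hv0x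
            simp at hv0x)
          (Or.inr ⟨(i : Int), List.mem_singleton.2 rfl, by simp [pvNrm]⟩)
      have hnrmi : pvNrm n' (i : Int) = i := by simp [pvNrm]
      rw [pvReps_succ_mem E i hmint]
      have hlenreps : (pvBlocks E n' i).length = (pvReps E i).length := by
        unfold pvBlocks
        exact List.length_map _
      refine ⟨D1, D2, ?_, ?_, ?_, ?_⟩
      · intro x hx
        rw [D3 x hx, C x hx]
        constructor
        · rintro (⟨j, hj, hc⟩ | hc)
          · exact ⟨j, by omega, hc⟩
          · exact ⟨i, by omega, hc⟩
        · rintro ⟨j, hj, hc⟩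
          rcases Nat.lt_or_ge j i with hji | hji
          · exact Or.inl ⟨j, hji, hc⟩
          · have hji' : j = i := by omega
            subst hji'
            exact Or.inr hc
      · rw [List.length_append, List.length_singleton, ← CC]
      · intro t ht
        rw [List.length_append, List.length_singleton] at ht
        unfold pvBlocks
        rw [pvReps_succ_mem E i hmint, List.map_append, List.map_singleton]
        rcases Nat.lt_or_ge t (pvReps E i).length with htl | htl
        · rw [D4 t (by omega), B1 t htl, List.getD_append _ _ _ _ (by simp only [List.length_map]; exact htl)]
          rfl
        · have htcc : t = (((List.range i).foldl
      (fun s (i : Nat) =>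
        if PySem.List.pyGetD s.1.1 (i : Int) false then s
        else
          let r := pvDfs adj s.1.1 s.1.2 s.2 [(i : Int)]
          ((r.1, r.2), s.2 + 1))
      ((List.replicate n' false, List.replicate n' (0 : Int)), 0))).2 := by omega
          subst htcc
          have hcount : (List.range n').countP
              (fun x => pvConnB E i x && !((((List.range i).foldl
      (fun s (i : Nat) =>
        if PySem.List.pyGetD s.1.1 (i : Int) false then s
        else
          let r := pvDfs adj s.1.1 s.1.2 s.2 [(i : Int)]
          ((r.1, r.2), s.2 + 1))
      ((List.replicate n' false, List.replicate n' (0 : Int)), 0))).1.1.getD x false)) = pvSize E n' i := by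
            unfold pvSize
            refine List.countP_congr ?_
            intro x hxm
            rw [List.mem_range] at hxm
            constructor
            · intro hb
              rw [Bool.and_eq_true] at hb
              exact hb.1
            · intro hb
              rw [Bool.and_eq_true]
              refine ⟨hb, ?_⟩
              rw [hdisj x hxm (pvConnB_eq_true.1 hb)]
              rfl
          rw [D5, B2 _ (by omega), hcount]
          have hgetlast : (((pvReps E i).map fun r => (pvSize E n' r : Int)) ++ [(pvSize E n' i : Int)]).getD
              (((List.range i).foldl
      (fun s (i : Nat) =>
        if PySem.List.pyGetD s.1.1 (i : Int) false then s
        else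
          let r := pvDfs adj s.1.1 s.1.2 s.2 [(i : Int)]
          ((r.1, r.2), s.2 + 1))
      ((List.replicate n' false, List.replicate n' (0 : Int)), 0))).2 0 = (pvSize E n' i : Int) := by
            rw [show (((List.range i).foldl
      (fun s (i : Nat) =>
        if PySem.List.pyGetD s.1.1 (i : Int) false then s
        else
          let r := pvDfs adj s.1.1 s.1.2 s.2 [(i : Int)]
          ((r.1, r.2), s.2 + 1))
      ((List.replicate n' false, List.replicate n' (0 : Int)), 0))).2 = ((pvReps E i).map fun r => (pvSize E n' r : Int)).length from by
              rw [List.length_map]; exact CC]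
            rw [List.getD_eq_getElem _ 0 (by simp)]
            exact List.getElem_concat_length rfl _
          rw [hgetlast]
          simp
      · intro t ht
        rw [List.length_append, List.length_singleton] at ht
        rw [D4 t (by omega), B2 t (by omega)]

theorem pvA_eq_formula (n m k : Int) (links : List (Int × Int))
    (hpre : Pre_count_ways_to_solve_crime n m k links) :
    count_ways_to_solve_crime n m k links =
      pvFormula n k (pvReps (pvE n.toNat links) n.toNat).length
        (pvBlocks (pvE n.toNat links) n.toNat n.toNat) := by
  obtain ⟨hok, -⟩ := hpre
  have hE : ∀ e ∈ pvE n.toNat links, e.1 < n.toNat ∧ e.2 < n.toNat := by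
    intro e he
    unfold pvE at he
    rw [List.mem_map] at he
    obtain ⟨p, hp, rfl⟩ := he
    exact ⟨pvNrm_lt (hok p hp).1, pvNrm_lt (hok p hp).2⟩
  have hbase2 : ∀ j, j < n.toNat → ∀ i ∈ (List.replicate n.toNat ([] : List Int)).getD j [],
      PySem.Raise.InRange n.toNat i := by
    intro j hj i hi
    rw [List.getD_replicate _ hj] at hi
    simp at hi
  have hbase3 : ∀ j, j < n.toNat → ∀ y, y < n.toNat →
      ((∃ i ∈ (List.replicate n.toNat ([] : List Int)).getD j [], pvNrm n.toNat i = y) ↔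
        pvEstep [] j y) := by
    intro j hj y hy
    rw [List.getD_replicate _ hj]
    unfold pvEstep
    simp
  have HA := pvAdj_inv n.toNat links [] (List.replicate n.toNat ([] : List Int))
    (by simp) hbase2 hbase3 hok
  rw [List.nil_append] at HA
  obtain ⟨hal, hain, hae⟩ := HA
  obtain ⟨O1, O2, O3, O4, O5, O6⟩ :=
    pvOuter_inv n.toNat (pvE n.toNat links) _ hal hain hae hE n.toNat le_rfl
  simp only [count_ways_to_solve_crime]
  rw [O4]
  unfold pvFormula
  by_cases hcc1 : (pvReps (pvE n.toNat links) n.toNat).length = 1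
  · rw [if_pos hcc1, if_pos hcc1]
  · rw [if_neg hcc1, if_neg hcc1]
    have hmap : (List.range (pvReps (pvE n.toNat links) n.toNat).length).map
        (fun (t : Nat) => PySem.List.pyGetD (((List.range n.toNat).foldl
      (fun s (i : Nat) =>
        if PySem.List.pyGetD s.1.1 (i : Int) false then s
        else
          let r := pvDfs (links.foldl
            (fun adj vw => pvAddNbr (pvAddNbr adj (vw.1 - 1) (vw.2 - 1)) (vw.2 - 1) (vw.1 - 1))
            (List.replicate n.toNat ([] : List Int))) s.1.1 s.1.2 s.2 [(i : Int)]
          ((r.1, r.2), s.2 + 1))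
      ((List.replicate n.toNat false, List.replicate n.toNat (0 : Int)), 0))).1.2 (t : Int) 0) =
        pvBlocks (pvE n.toNat links) n.toNat n.toNat := by
      refine List.ext_getElem ?_ ?_
      · rw [List.length_map, List.length_range]
        unfold pvBlocks
        rw [List.length_map]
      · intro t h1 h2
        rw [List.getElem_map, List.getElem_range]
        have h1' : t < (pvReps (pvE n.toNat links) n.toNat).length := by simpa using h1
        have hgd : PySem.List.pyGetD (((List.range n.toNat).foldl
      (fun s (i : Nat) =>
        if PySem.List.pyGetD s.1.1 (i : Int) false then s
        else
          let r := pvDfs (links.foldl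
            (fun adj vw => pvAddNbr (pvAddNbr adj (vw.1 - 1) (vw.2 - 1)) (vw.2 - 1) (vw.1 - 1))
            (List.replicate n.toNat ([] : List Int))) s.1.1 s.1.2 s.2 [(i : Int)]
          ((r.1, r.2), s.2 + 1))
      ((List.replicate n.toNat false, List.replicate n.toNat (0 : Int)), 0))).1.2 ((t : Nat) : Int) 0 =
            (((List.range n.toNat).foldl
      (fun s (i : Nat) =>
        if PySem.List.pyGetD s.1.1 (i : Int) false then s
        else
          let r := pvDfs (links.foldl
            (fun adj vw => pvAddNbr (pvAddNbr adj (vw.1 - 1) (vw.2 - 1)) (vw.2 - 1) (vw.1 - 1))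
            (List.replicate n.toNat ([] : List Int))) s.1.1 s.1.2 s.2 [(i : Int)]
          ((r.1, r.2), s.2 + 1))
      ((List.replicate n.toNat false, List.replicate n.toNat (0 : Int)), 0))).1.2.getD t 0 := by simp
        rw [hgd, O5 t h1', List.getD_eq_getElem _ 0 h2]
    rw [← hmap, List.foldl_map]

theorem pvB_eq_formula (n m k : Int) (links : List (Int × Int))
    (hpre : Pre_count_ways_to_solve_crime n m k links) :
    count_ways_to_solve_crime_alt n m k links =
      pvFormula n k (pvReps (pvE n.toNat links) n.toNat).length
        (pvBlocks (pvE n.toNat links) n.toNat n.toNat) := by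
  obtain ⟨hok, -⟩ := hpre
  simp only [count_ways_to_solve_crime_alt]
  have hlen0 : ((List.range n.toNat).map (fun x : Nat => (x : Int))).length = n.toNat := by simp
  have hchar0 : ∀ x y, x < n.toNat → y < n.toNat →
      (((List.range n.toNat).map (fun x : Nat => (x : Int))).getD x 0 =
       ((List.range n.toNat).map (fun x : Nat => (x : Int))).getD y 0 ↔ pvConn [] x y) := by
    intro x y hx hy
    rw [List.getD_eq_getElem _ 0 (by simpa using hx), List.getD_eq_getElem _ 0 (by simpa using hy), pvConn_nil]
    simp only [List.getElem_map, List.getElem_range]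
    exact Int.natCast_inj
  have H := pvComp_inv n.toNat links [] _ hlen0 hchar0 hok
  rw [List.nil_append] at H
  obtain ⟨Hlen, Hchar⟩ := H
  set comp := links.foldl
    (fun comp vw =>
      match PySem.List.pyGet? comp (vw.1 - 1), PySem.List.pyGet? comp (vw.2 - 1) with
      | some a, some b => if a ≠ b then comp.map (fun c => if c = a then b else c) else comp
      | _, _ => comp)
    ((List.range n.toNat).map (fun x : Nat => (x : Int))) with hcomp
  rw [PySem.Dict.foldl_insert_getD_add_one_eq_counter]
  have hset : PySem.Set.ofList comp = (pvReps (pvE n.toNat links) n.toNat).map (fun r => comp.getD r 0) := by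
    rw [pvOfList_eq_first]
    congr 1
    unfold pvFirst pvReps
    rw [Hlen]
    refine List.filter_congr ?_
    intro x hx
    rw [List.mem_range] at hx
    unfold pvMinB
    congr 1
    rw [Bool.eq_iff_iff]
    simp only [decide_eq_true_eq, List.any_eq_true, List.mem_range]
    constructor
    · intro hmem
      rw [List.mem_take_iff_getElem] at hmem
      obtain ⟨j, hj, hjv⟩ := hmem
      have hjx : j < x := lt_of_lt_of_le hj (min_le_left _ _)
      have hjn : j < n.toNat := by omega
      refine ⟨j, hjx, ?_⟩
      rw [pvConnB_eq_true]
      refine (Hchar j x hjn hx).1 ?_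
      rw [List.getD_eq_getElem _ 0 (by rw [Hlen]; exact hjn)]
      exact hjv
    · rintro ⟨j, hjx, hconn⟩
      rw [pvConnB_eq_true] at hconn
      have hjn : j < n.toNat := by omega
      rw [List.mem_take_iff_getElem]
      refine ⟨j, by rw [Hlen]; omega, ?_⟩
      rw [← List.getD_eq_getElem comp 0 (by rw [Hlen]; exact hjn)]
      exact (Hchar j x hjn hx).2 hconn
  have hrepr : comp = (List.range n.toNat).map (fun x => comp.getD x 0) := by
    refine List.ext_getElem (by simp [Hlen]) ?_
    intro i h1 h2
    simp only [List.getElem_map, List.getElem_range]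
    rw [List.getD_eq_getElem _ 0 h1]
  have hcnt : ∀ r, r < n.toNat → List.count (comp.getD r 0) comp = pvSize (pvE n.toNat links) n.toNat r := by
    intro r hr
    have key : ∀ c : Int, c = comp.getD r 0 → List.count c comp = pvSize (pvE n.toNat links) n.toNat r := by
      intro c hc
      conv_lhs => rw [hrepr]
      rw [List.count_eq_countP, List.countP_map]
      unfold pvSize
      refine List.countP_congr ?_
      intro x hxmem
      rw [List.mem_range] at hxmem
      simp only [Function.comp_apply, beq_iff_eq]
      rw [pvConnB_eq_true, hc]
      constructor
      · intro h
        exact pvConn_symm ((Hchar x r hxmem hr).1 h)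
      · intro h
        exact (Hchar x r hxmem hr).2 (pvConn_symm h)
    exact key _ rfl
  have hccsize : (PySem.Dict.counter comp).size = (pvReps (pvE n.toNat links) n.toNat).length := by
    simp only [PySem.Dict.size, PySem.Dict.items_counter, List.length_map, hset]
  have hvals : (PySem.Dict.counter comp).values = pvBlocks (pvE n.toNat links) n.toNat n.toNat := by
    simp only [PySem.Dict.values, PySem.Dict.items_counter, List.map_map]
    rw [hset, List.map_map]
    unfold pvBlocks
    refine List.map_congr_left ?_
    intro r hrmem
    have hr : r < n.toNat := by
      unfold pvReps at hrmem
      have := List.mem_of_mem_filter hrmem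
      rwa [List.mem_range] at this
    simp only [Function.comp_apply]
    rw [hcnt r hr]
  rw [hccsize, hvals]
  rfl

-- ===== VERDICT (by name: the statement is the Claim_ definition above) =====
theorem count_ways_to_solve_crime_spec : Claim_equal_count_ways_to_solve_crime := by
  intro n m k links _hdom hpre
  unfold Spec_count_ways_to_solve_crime
  rw [pvA_eq_formula n m k links hpre, pvB_eq_formula n m k links hpre]
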